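-- pv_equiv track=rewrite | github.com/limtis0/ProjectEulerPython | 26-50/026.py | _get_cycle_size
-- ===== SOURCE A (Python) =====
-- def _get_cycle_size(div, num=1):
--     d = {}
--     ind = 0
--     while num != 0:
--         num = num * 10 % div
--         if num in d:
--             return ind - d[num]
--         d[num] = ind
--         ind += 1
--     return 0
-- ===== SOURCE B (Python) =====
-- def _get_cycle_size(div, num=1):
--     # Remember only the SET of remainders seen; when a remainder repeats,
--     # walk around the cycle once more to measure its length (no index bookkeeping).
--     seen = set()
--     while num != 0:
--         num = num * 10 % div
--         if num in seen:
--             break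
--         seen.add(num)
--     else:
--         return 0
--     length = 1
--     x = num * 10 % div
--     while x != num:
--         x = x * 10 % div
--         length += 1
--     return length
-- ===== Notes on version B (the rewrite author's own statement) =====
-- stated objective: alternative
-- what changed: Replaces the remainder->index dict and index arithmetic by a membership-only seen set plus a second loop that walks once around the detected cycle to measure its length.
import Mathlib
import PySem

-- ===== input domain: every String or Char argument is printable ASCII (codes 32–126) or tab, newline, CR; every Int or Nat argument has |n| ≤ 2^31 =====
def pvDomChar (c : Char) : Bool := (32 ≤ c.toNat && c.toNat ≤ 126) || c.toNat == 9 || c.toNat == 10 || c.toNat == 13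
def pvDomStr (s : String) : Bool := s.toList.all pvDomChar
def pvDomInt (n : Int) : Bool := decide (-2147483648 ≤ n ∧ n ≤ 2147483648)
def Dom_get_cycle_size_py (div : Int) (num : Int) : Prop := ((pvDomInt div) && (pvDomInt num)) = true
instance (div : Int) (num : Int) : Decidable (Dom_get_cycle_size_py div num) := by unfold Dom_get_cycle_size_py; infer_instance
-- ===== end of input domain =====

-- B replaces A's remainder->index dict by a membership-only seen set and measures the
-- cycle length with a second walk around the cycle; same asymptotic cost (objective: alternative).

-- one Python loop step: num * 10 % div (shared by both sources verbatim)
def pvF (dv x : Int) : Int := PySem.Int.mod (x * 10) dv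

-- ===== PORT A =====
def pvALoop (dv : Int) : Nat → PySem.Dict Int Int → Int → Int → Int
  | 0, _, _, _ => 0
  | fuel+1, d, ind, num =>
    if num = 0 then 0
    else
      let num' := pvF dv num
      match PySem.Dict.get? d num' with
      | some j => ind - j
      | none => pvALoop dv fuel (PySem.Dict.insert d num' ind) (ind + 1) num'

def get_cycle_size_py (div : Int) (num : Int) : Int :=
  pvALoop div (div.natAbs + 2) PySem.Dict.empty 0 num

-- ===== PORT B =====
def pvBSearch (dv : Int) : Nat → PySem.Set Int → Int → Option Int
  | 0, _, _ => none
  | fuel+1, seen, num =>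
    if num = 0 then none
    else
      let num' := pvF dv num
      if PySem.Set.contains seen num' then some num'
      else pvBSearch dv fuel (PySem.Set.add seen num') num'

def pvBWalk (dv : Int) : Nat → Int → Int → Int → Int
  | 0, _, _, len => len
  | fuel+1, r, x, len => if x = r then len else pvBWalk dv fuel r (pvF dv x) (len + 1)

def get_cycle_size_py_alt (div : Int) (num : Int) : Int :=
  match pvBSearch div (div.natAbs + 2) PySem.Set.empty num with
  | none => 0
  | some r => pvBWalk div (div.natAbs + 2) r (pvF div r) 1

-- ===== PRECONDITION & SPEC =====
-- Pre_ excludes only div = 0 with num ≠ 0, where the Python A raises ZeroDivisionError (B raises there too).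
def Pre_get_cycle_size_py (div : Int) (num : Int) : Prop := div ≠ 0 ∨ num = 0
instance (div : Int) (num : Int) : Decidable (Pre_get_cycle_size_py div num) := by unfold Pre_get_cycle_size_py; infer_instance
def pvWitness_get_cycle_size_py : Int × Int := (7, 1)

def Spec_get_cycle_size_py (div : Int) (num : Int) (out : Int) : Prop := out = get_cycle_size_py_alt div num
instance (div : Int) (num : Int) (out : Int) : Decidable (Spec_get_cycle_size_py div num out) := by unfold Spec_get_cycle_size_py; infer_instance

-- ===== CLAIM (what is proved, stated in full; the proofs are below) =====
def Claim_equal_get_cycle_size_py : Prop := ∀ (div : Int) (num : Int), Dom_get_cycle_size_py div num → Pre_get_cycle_size_py div num → Spec_get_cycle_size_py div num (get_cycle_size_py div num)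

-- ===== LEMMAS AND PROOFS =====

-- the trajectory num, num*10%div, (num*10%div)*10%div, …
def pvT (dv num : Int) : Nat → Int
  | 0 => num
  | k+1 => pvF dv (pvT dv num k)

-- "the loops stop after iteration k+1": the new remainder is 0 or was seen before
def pvQ (dv num : Int) (k : Nat) : Prop :=
  pvT dv num (k+1) = 0 ∨ ∃ j < k + 1, 1 ≤ j ∧ pvT dv num j = pvT dv num (k+1)

lemma pvF_natAbs_lt (dv x : Int) (hd : dv ≠ 0) : (pvF dv x).natAbs < dv.natAbs := by
  unfold pvF
  rcases lt_or_gt_of_ne hd with h | h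
  · have := PySem.Int.mod_neg_bounds (x * 10) h
    omega
  · have h1 := PySem.Int.mod_nonneg (x * 10) h
    have h2 := PySem.Int.mod_lt (x * 10) h
    omega

lemma pvT_natAbs_lt (dv num : Int) (hd : dv ≠ 0) (k : Nat) (hk : 1 ≤ k) :
    (pvT dv num k).natAbs < dv.natAbs := by
  obtain ⟨m, rfl⟩ : ∃ m, k = m + 1 := ⟨k - 1, by omega⟩
  exact pvF_natAbs_lt dv _ hd

lemma pv_exists_stop (dv num : Int) (hd : dv ≠ 0) : ∃ k, k < dv.natAbs ∧ pvQ dv num k := by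
  by_contra h
  push Not at h
  have hnz : ∀ t, 1 ≤ t → t ≤ dv.natAbs → pvT dv num t ≠ 0 := by
    intro t h1 h2 h0
    have ht : t - 1 + 1 = t := by omega
    exact h (t-1) (by omega) (Or.inl (by rw [ht]; exact h0))
  have hinj : ∀ s t, 1 ≤ s → s < t → t ≤ dv.natAbs → pvT dv num s ≠ pvT dv num t := by
    intro s t h1 h2 h3 heq
    have ht : t - 1 + 1 = t := by omega
    exact h (t-1) (by omega) (Or.inr ⟨s, by omega, h1, by rw [ht]; exact heq⟩)
  have hnd : ((List.range dv.natAbs).map (fun t => pvT dv num (t+1))).Nodup := by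
    refine List.Nodup.map_on ?_ (List.nodup_range)
    intro a ha b hb heq
    rw [List.mem_range] at ha hb
    by_contra hne
    rcases Nat.lt_or_ge a b with hab | hab
    · exact hinj (a+1) (b+1) (by omega) (by omega) (by omega) heq
    · exact hinj (b+1) (a+1) (by omega) (by omega) (by omega) heq.symm
  have hlen : ((List.range dv.natAbs).map (fun t => pvT dv num (t+1))).length = dv.natAbs := by
    simp
  have habs : dv.natAbs ≠ 0 := by omega
  rcases lt_or_gt_of_ne hd with hneg | hpos
  · have hmem : ∀ y ∈ (List.range dv.natAbs).map (fun t => pvT dv num (t+1)),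
        y ∈ Finset.Ico (dv + 1) (0 : Int) := by
      intro y hy
      rcases List.mem_map.mp hy with ⟨t, ht, rfl⟩
      rw [List.mem_range] at ht
      have h1 := pvT_natAbs_lt dv num hd (t+1) (by omega)
      have h2 : pvT dv num (t+1) ≤ 0 := by
        show pvF dv (pvT dv num t) ≤ 0
        exact (PySem.Int.mod_neg_bounds _ hneg).2
      have h3 := hnz (t+1) (by omega) (by omega)
      rw [Finset.mem_Ico]
      omega
    have hcard : (Finset.Ico (dv + 1) (0 : Int)).card = dv.natAbs - 1 := by
      rw [Int.card_Ico]
      omega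
    have := Finset.card_le_card (fun y hy => hmem y (List.mem_toFinset.mp hy))
    rw [List.toFinset_card_of_nodup hnd, hlen, hcard] at this
    omega
  · have hmem : ∀ y ∈ (List.range dv.natAbs).map (fun t => pvT dv num (t+1)),
        y ∈ Finset.Ico (1 : Int) dv := by
      intro y hy
      rcases List.mem_map.mp hy with ⟨t, ht, rfl⟩
      rw [List.mem_range] at ht
      have h1 := pvT_natAbs_lt dv num hd (t+1) (by omega)
      have h2 : 0 ≤ pvT dv num (t+1) := by
        show 0 ≤ pvF dv (pvT dv num t)
        exact PySem.Int.mod_nonneg _ hpos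
      have h3 := hnz (t+1) (by omega) (by omega)
      rw [Finset.mem_Ico]
      omega
    have hcard : (Finset.Ico (1 : Int) dv).card = dv.natAbs - 1 := by
      rw [Int.card_Ico]
      omega
    have := Finset.card_le_card (fun y hy => hmem y (List.mem_toFinset.mp hy))
    rw [List.toFinset_card_of_nodup hnd, hlen, hcard] at this
    omega

lemma pv_exists_min_stop (dv num : Int) (hd : dv ≠ 0) :
    ∃ K, K < dv.natAbs ∧ pvQ dv num K ∧ ∀ k < K, ¬ pvQ dv num k := by
  classical
  obtain ⟨k0, hk0, hQ0⟩ := pv_exists_stop dv num hd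
  have hex : ∃ k, pvQ dv num k := ⟨k0, hQ0⟩
  refine ⟨Nat.find hex, ?_, Nat.find_spec hex, fun k hk => Nat.find_min hex hk⟩
  exact lt_of_le_of_lt (Nat.find_min' hex hQ0) hk0

-- below a minimal stop, every remainder on the trajectory is nonzero
lemma pvT_ne_zero (dv num : Int) (K : Nat) (hmin : ∀ k < K, ¬ pvQ dv num k)
    (hn : num ≠ 0) (i : Nat) (hi : i ≤ K) : pvT dv num i ≠ 0 := by
  cases i with
  | zero => exact hn
  | succ m =>
    intro h0
    exact hmin m (by omega) (Or.inl h0)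

-- A's loop, zero-stop case
lemma pvA_zero (dv num : Int) (K : Nat) (hmin : ∀ k < K, ¬ pvQ dv num k)
    (h0 : pvT dv num (K+1) = 0) (hn : num ≠ 0) :
    ∀ n i, i + n = K → ∀ (d : PySem.Dict Int Int) fuel,
      (∀ y : Int, (∀ t, 1 ≤ t → t ≤ i → y ≠ pvT dv num t) → d.get? y = none) →
      K + 2 - i ≤ fuel →
      pvALoop dv fuel d (i : Int) (pvT dv num i) = 0 := by
  intro n
  induction n with
  | zero =>
    intro i hiK d fuel h2 hfuel
    have hiK' : i = K := by omega
    subst hiK'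
    obtain ⟨f, rfl⟩ : ∃ f, fuel = f + 1 := ⟨fuel - 1, by omega⟩
    simp only [pvALoop]
    rw [if_neg (pvT_ne_zero dv num i hmin hn i le_rfl)]
    have hg : PySem.Dict.get? d (pvF dv (pvT dv num i)) = none := by
      apply h2
      intro t h1 h2' heq
      exact pvT_ne_zero dv num i hmin hn t h2' (by rw [← heq]; exact h0)
    rw [hg]
    obtain ⟨f', rfl⟩ : ∃ f', f = f' + 1 := ⟨f - 1, by omega⟩
    show pvALoop dv (f' + 1) _ _ (pvT dv num (i+1)) = 0
    rw [h0]
    simp [pvALoop]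
  | succ n ih =>
    intro i hiK d fuel h2 hfuel
    obtain ⟨f, rfl⟩ : ∃ f, fuel = f + 1 := ⟨fuel - 1, by omega⟩
    simp only [pvALoop]
    rw [if_neg (pvT_ne_zero dv num K hmin hn i (by omega))]
    have hQi := hmin i (by omega)
    unfold pvQ at hQi
    push Not at hQi
    have hfresh : ∀ t, 1 ≤ t → t ≤ i → pvT dv num (i+1) ≠ pvT dv num t := by
      intro t h1 ht heq
      exact hQi.2 t (by omega) h1 heq.symm
    have hg : PySem.Dict.get? d (pvF dv (pvT dv num i)) = none := h2 _ hfresh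
    rw [hg]
    show pvALoop dv f (PySem.Dict.insert d (pvF dv (pvT dv num i)) (i : Int)) ((i : Int) + 1)
        (pvT dv num (i+1)) = 0
    have hcast : ((i : Int) + 1) = ((i + 1 : Nat) : Int) := by push_cast; ring
    rw [hcast]
    apply ih (i+1) (by omega) _ f _ (by omega)
    intro y hy
    have hyne : y ≠ pvF dv (pvT dv num i) := hy (i+1) (by omega) le_rfl
    rw [PySem.Dict.get?_insert_of_ne d _ hyne]
    exact h2 y (fun t h1 ht => hy t h1 (by omega))

-- A's loop, repeat-stop case
lemma pvA_rep (dv num : Int) (K : Nat) (hmin : ∀ k < K, ¬ pvQ dv num k)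
    (j : Nat) (hj1 : 1 ≤ j) (hjK : j ≤ K) (hjx : pvT dv num j = pvT dv num (K+1)) (hn : num ≠ 0) :
    ∀ n i, i + n = K → ∀ (d : PySem.Dict Int Int) fuel,
      (∀ t, 1 ≤ t → t ≤ i → d.get? (pvT dv num t) = some ((t : Int) - 1)) →
      (∀ y : Int, (∀ t, 1 ≤ t → t ≤ i → y ≠ pvT dv num t) → d.get? y = none) →
      K + 2 - i ≤ fuel →
      pvALoop dv fuel d (i : Int) (pvT dv num i) = (K : Int) - ((j : Int) - 1) := by
  intro n
  induction n with
  | zero =>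
    intro i hiK d fuel h1 h2 hfuel
    have hiK' : i = K := by omega
    subst hiK'
    obtain ⟨f, rfl⟩ : ∃ f, fuel = f + 1 := ⟨fuel - 1, by omega⟩
    simp only [pvALoop]
    rw [if_neg (pvT_ne_zero dv num i hmin hn i le_rfl)]
    have hg : PySem.Dict.get? d (pvF dv (pvT dv num i)) = some ((j : Int) - 1) := by
      have := h1 j hj1 hjK
      rw [hjx] at this
      exact this
    rw [hg]
  | succ n ih =>
    intro i hiK d fuel h1 h2 hfuel
    obtain ⟨f, rfl⟩ : ∃ f, fuel = f + 1 := ⟨fuel - 1, by omega⟩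
    simp only [pvALoop]
    rw [if_neg (pvT_ne_zero dv num K hmin hn i (by omega))]
    have hQi := hmin i (by omega)
    unfold pvQ at hQi
    push Not at hQi
    have hfresh : ∀ t, 1 ≤ t → t ≤ i → pvT dv num (i+1) ≠ pvT dv num t := by
      intro t ht1 ht heq
      exact hQi.2 t (by omega) ht1 heq.symm
    have hg : PySem.Dict.get? d (pvF dv (pvT dv num i)) = none := h2 _ hfresh
    rw [hg]
    show pvALoop dv f (PySem.Dict.insert d (pvF dv (pvT dv num i)) (i : Int)) ((i : Int) + 1)
        (pvT dv num (i+1)) = (K : Int) - ((j : Int) - 1)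
    have hcast : ((i : Int) + 1) = ((i + 1 : Nat) : Int) := by push_cast; ring
    rw [hcast]
    apply ih (i+1) (by omega) _ f _ _ (by omega)
    · intro t ht1 ht
      by_cases htt : t = i + 1
      · subst htt
        show PySem.Dict.get? _ (pvT dv num (i+1)) = _
        have : pvT dv num (i+1) = pvF dv (pvT dv num i) := rfl
        rw [this, PySem.Dict.get?_insert_self d _ _]
        congr 1
        push_cast; ring
      · rw [PySem.Dict.get?_insert_of_ne d _ (show pvT dv num t ≠ pvF dv (pvT dv num i) by
          have := hfresh t ht1 (by omega)
          exact fun heq => this heq.symm)]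
        exact h1 t ht1 (by omega)
    · intro y hy
      have hyne : y ≠ pvF dv (pvT dv num i) := hy (i+1) (by omega) le_rfl
      rw [PySem.Dict.get?_insert_of_ne d _ hyne]
      exact h2 y (fun t ht1 ht => hy t ht1 (by omega))

-- B's first loop, both cases at once
lemma pvB1_run (dv num : Int) (K : Nat) (hmin : ∀ k < K, ¬ pvQ dv num k)
    (hQ : pvQ dv num K) (hn : num ≠ 0) :
    ∀ n i, i + n = K → ∀ (s : PySem.Set Int) fuel,
      (∀ y : Int, y ∈ s ↔ ∃ t, 1 ≤ t ∧ t ≤ i ∧ y = pvT dv num t) →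
      K + 2 - i ≤ fuel →
      pvBSearch dv fuel s (pvT dv num i) =
        (if pvT dv num (K+1) = 0 then none else some (pvT dv num (K+1))) := by
  intro n
  induction n with
  | zero =>
    intro i hiK s fuel hs hfuel
    have hiK' : i = K := by omega
    subst hiK'
    obtain ⟨f, rfl⟩ : ∃ f, fuel = f + 1 := ⟨fuel - 1, by omega⟩
    simp only [pvBSearch]
    rw [if_neg (pvT_ne_zero dv num i hmin hn i le_rfl)]
    by_cases hz : pvT dv num (i+1) = 0
    · have hc : PySem.Set.contains s (pvF dv (pvT dv num i)) = false := by
        rw [← Bool.not_eq_true, PySem.Set.contains_iff]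
        intro hmem
        obtain ⟨t, ht1, hti, heq⟩ := (hs _).mp hmem
        exact pvT_ne_zero dv num i hmin hn t hti (by rw [← heq]; exact hz)
      rw [hc]
      simp only [Bool.false_eq_true, if_false]
      obtain ⟨f', rfl⟩ : ∃ f', f = f' + 1 := ⟨f - 1, by omega⟩
      show pvBSearch dv (f' + 1) _ (pvT dv num (i+1)) = _
      rw [hz, if_pos rfl]
      simp [pvBSearch]
    · rcases hQ with h0 | ⟨j, hjlt, hj1, hjx⟩
      · exact absurd h0 hz
      · have hc : PySem.Set.contains s (pvF dv (pvT dv num i)) = true := by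
          rw [PySem.Set.contains_iff]
          exact (hs _).mpr ⟨j, hj1, by omega, hjx.symm⟩
        rw [hc]
        simp only [if_true]
        rw [if_neg hz]
        rfl
  | succ n ih =>
    intro i hiK s fuel hs hfuel
    obtain ⟨f, rfl⟩ : ∃ f, fuel = f + 1 := ⟨fuel - 1, by omega⟩
    simp only [pvBSearch]
    rw [if_neg (pvT_ne_zero dv num K hmin hn i (by omega))]
    have hQi := hmin i (by omega)
    unfold pvQ at hQi
    push Not at hQi
    have hc : PySem.Set.contains s (pvF dv (pvT dv num i)) = false := by
      rw [← Bool.not_eq_true, PySem.Set.contains_iff]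
      intro hmem
      obtain ⟨t, ht1, hti, heq⟩ := (hs _).mp hmem
      exact hQi.2 t (by omega) ht1 heq.symm
    rw [hc]
    simp only [Bool.false_eq_true, if_false]
    show pvBSearch dv f (PySem.Set.add s (pvF dv (pvT dv num i))) (pvT dv num (i+1)) = _
    apply ih (i+1) (by omega) _ f _ (by omega)
    intro y
    rw [PySem.Set.mem_add]
    constructor
    · rintro (hy | rfl)
      · obtain ⟨t, ht1, hti, heq⟩ := (hs _).mp hy
        exact ⟨t, ht1, by omega, heq⟩
      · exact ⟨i+1, by omega, le_rfl, rfl⟩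
    · rintro ⟨t, ht1, hti, rfl⟩
      by_cases htt : t = i + 1
      · subst htt
        exact Or.inr rfl
      · exact Or.inl ((hs _).mpr ⟨t, ht1, by omega, rfl⟩)

-- B's second loop walks once around the cycle
lemma pvB2_run (dv num : Int) (K : Nat) (hmin : ∀ k < K, ¬ pvQ dv num k)
    (j : Nat) (hj1 : 1 ≤ j) (hjK : j ≤ K) (hjx : pvT dv num j = pvT dv num (K+1)) :
    ∀ n c, 1 ≤ c → c + n = K + 1 - j → ∀ fuel, n < fuel →
      pvBWalk dv fuel (pvT dv num (K+1)) (pvT dv num (j + c)) (c : Int) = ((K + 1 - j : Nat) : Int) := by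
  intro n
  induction n with
  | zero =>
    intro c hc1 hcp fuel hfuel
    obtain ⟨f, rfl⟩ : ∃ f, fuel = f + 1 := ⟨fuel - 1, by omega⟩
    have hjc : j + c = K + 1 := by omega
    simp only [pvBWalk]
    rw [hjc, if_pos rfl]
    omega
  | succ n ih =>
    intro c hc1 hcp fuel hfuel
    obtain ⟨f, rfl⟩ : ∃ f, fuel = f + 1 := ⟨fuel - 1, by omega⟩
    simp only [pvBWalk]
    have hne : pvT dv num (j + c) ≠ pvT dv num (K+1) := by
      intro heq
      have heq' : pvT dv num j = pvT dv num (j + c) := by rw [heq, ← hjx]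
      have hstop : pvQ dv num (j + c - 1) := by
        right
        refine ⟨j, by omega, hj1, ?_⟩
        have : j + c - 1 + 1 = j + c := by omega
        rw [this]
        exact heq'
      exact hmin (j + c - 1) (by omega) hstop
    rw [if_neg hne]
    have hx : pvF dv (pvT dv num (j + c)) = pvT dv num (j + (c + 1)) := by
      have h' : j + (c + 1) = (j + c) + 1 := by omega
      rw [h']
      rfl
    have hlen : (c : Int) + 1 = ((c + 1 : Nat) : Int) := by push_cast; ring
    rw [hx, hlen]
    exact ih (c+1) (by omega) (by omega) f (by omega)

-- ===== VERDICT (by name: the statement is the Claim_ definition above) =====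
theorem get_cycle_size_py_spec : Claim_equal_get_cycle_size_py := by
  intro div num hdom hpre
  unfold Spec_get_cycle_size_py get_cycle_size_py get_cycle_size_py_alt
  by_cases hn : num = 0
  · subst hn
    obtain ⟨m, hm⟩ : ∃ m, div.natAbs + 2 = m + 1 := ⟨div.natAbs + 1, by omega⟩
    rw [hm]
    simp [pvALoop, pvBSearch]
  · have hd : div ≠ 0 := hpre.resolve_right hn
    obtain ⟨K, hKlt, hQ, hmin⟩ := pv_exists_min_stop div num hd
    have hnum0 : num = pvT div num 0 := rfl
    rcases hQ with h0 | ⟨j, hjlt, hj1, hjx⟩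
    · have hA := pvA_zero div num K hmin h0 hn K 0 (by omega) PySem.Dict.empty
        (div.natAbs + 2) (fun y _ => PySem.Dict.get?_empty y) (by omega)
      have hB := pvB1_run div num K hmin (Or.inl h0) hn K 0 (by omega) PySem.Set.empty
        (div.natAbs + 2) (by intro y; simp [PySem.Set.empty]) (by omega)
      rw [if_pos h0] at hB
      rw [hnum0]
      norm_num at hA hB ⊢
      rw [hA, hB]
    · have hjK : j ≤ K := by omega
      have hz : pvT div num (K+1) ≠ 0 := by
        rw [← hjx]
        exact pvT_ne_zero div num K hmin hn j hjK
      have hA := pvA_rep div num K hmin j hj1 hjK hjx hn K 0 (by omega) PySem.Dict.empty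
        (div.natAbs + 2)
        (by intro t ht1 ht0; omega)
        (fun y _ => PySem.Dict.get?_empty y) (by omega)
      have hB := pvB1_run div num K hmin (Or.inr ⟨j, hjlt, hj1, hjx⟩) hn K 0 (by omega)
        PySem.Set.empty (div.natAbs + 2) (by intro y; simp [PySem.Set.empty]) (by omega)
      rw [if_neg hz] at hB
      have hW := pvB2_run div num K hmin j hj1 hjK hjx (K - j) 1 le_rfl (by omega)
        (div.natAbs + 2) (by omega)
      rw [hnum0]
      norm_num at hA hB ⊢
      rw [hA, hB]
      have hF : pvF div (pvT div num (K+1)) = pvT div num (j + 1) := by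
        rw [← hjx]
        rfl
      show (K : Int) - ((j : Int) - 1) =
        pvBWalk div (div.natAbs + 2) (pvT div num (K+1)) (pvF div (pvT div num (K+1))) 1
      rw [hF]
      have h1c : (1 : Int) = ((1 : Nat) : Int) := by norm_num
      rw [h1c, hW]
      omega
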